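-- pv_equiv track=rewrite | github.com/jasonppy/VoiceCraft | edit_utils.py | get_edits
-- ===== SOURCE A (Python) =====
-- def get_edits(operations):
--     used_edits = []
--     prev_op = ""
--     for op in operations:
--         if op == "i" and prev_op != "i":
--             used_edits.append("insertion")
--         elif op == "d" and prev_op != "d":
--             used_edits.append("deletion")
--         elif op == "s" and prev_op != "s":
--             used_edits.append("substitution")
--         prev_op = op
--     return used_edits
-- ===== SOURCE B (Python) =====
-- def get_edits(operations):
--     labels = {"i": "insertion", "d": "deletion", "s": "substitution"}
--
--     def solve(ops):
--         if len(ops) <= 1: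
--             return [labels[op] for op in ops if op in labels]
--         mid = len(ops) // 2
--         left, right = ops[:mid], ops[mid:]
--         merged = solve(right)
--         if left[-1] == right[0] and right[0] in labels:
--             merged = merged[1:]  # the run crosses the split: drop the duplicate label
--         return solve(left) + merged
--
--     return solve(list(operations))
-- ===== Notes on version B (the rewrite author's own statement) =====
-- stated objective: alternative
-- what changed: Replaces the stateful left-to-right prev_op scan with a divide-and-conquer recursion: split the list in half, solve each half independently, and at the merge drop the right half's leading label when a labeled run crosses the split point.
import Mathlib
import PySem

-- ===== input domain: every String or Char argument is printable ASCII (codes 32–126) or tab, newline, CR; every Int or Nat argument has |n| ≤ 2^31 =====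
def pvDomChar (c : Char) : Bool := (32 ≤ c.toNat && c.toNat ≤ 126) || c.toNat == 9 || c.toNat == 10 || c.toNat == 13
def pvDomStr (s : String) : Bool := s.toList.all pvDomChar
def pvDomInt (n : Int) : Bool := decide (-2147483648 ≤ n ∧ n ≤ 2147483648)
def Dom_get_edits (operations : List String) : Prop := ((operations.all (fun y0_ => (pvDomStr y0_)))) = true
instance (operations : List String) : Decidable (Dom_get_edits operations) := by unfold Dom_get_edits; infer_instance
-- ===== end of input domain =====

-- B replaces A's stateful prev_op scan by a divide-and-conquer recursion (solve halves, drop the right half's leading label when a labeled run crosses the split); same return value, alternative algorithm.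

-- ===== PORT A =====
def get_edits (operations : List String) : List String :=
  (operations.foldl
    (fun (st : List String × String) op =>
      if op = "i" ∧ st.2 ≠ "i" then (st.1 ++ ["insertion"], op)
      else if op = "d" ∧ st.2 ≠ "d" then (st.1 ++ ["deletion"], op)
      else if op = "s" ∧ st.2 ≠ "s" then (st.1 ++ ["substitution"], op)
      else (st.1, op))
    (([] : List String), "")).1

-- ===== PORT B =====
-- the dict `labels`; `op in labels` / `labels[op]` via first-match lookup
def pvLabels : List (String × String) :=
  [("i", "insertion"), ("d", "deletion"), ("s", "substitution")]
def pvLabelOpt (op : String) : Option String :=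
  (pvLabels.find? (fun kv => kv.1 == op)).map Prod.snd

-- `solve`: Python's `ops[:mid]`/`ops[mid:]` are take/drop (mid in range), `left[-1]`/`right[0]`
-- read the last/first element (both halves nonempty here, so getD is exact), `merged[1:]` is drop 1.
-- (Python's locals mid/left/right/merged are inlined here; `merged = merged[1:]` is the then-branch.)
def pvSolve (ops : List String) : List String :=
  if _h : ops.length ≤ 1 then ops.filterMap pvLabelOpt
  else
    pvSolve (ops.take (ops.length / 2)) ++
      (if (ops.take (ops.length / 2)).getLast?.getD "" = (ops.drop (ops.length / 2)).head?.getD ""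
          ∧ (pvLabelOpt ((ops.drop (ops.length / 2)).head?.getD "")).isSome
       then (pvSolve (ops.drop (ops.length / 2))).drop 1
       else pvSolve (ops.drop (ops.length / 2)))
termination_by ops.length
decreasing_by
  all_goals simp only [List.length_take, List.length_drop]; omega

def get_edits_alt (operations : List String) : List String :=
  pvSolve operations

-- ===== PRECONDITION & SPEC =====
def Spec_get_edits (operations : List String) (out : List String) : Prop := out = get_edits_alt operations
instance (operations : List String) (out : List String) : Decidable (Spec_get_edits operations out) := by unfold Spec_get_edits; infer_instance

-- ===== CLAIM (what is proved, stated in full; the proofs are below) =====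
def Claim_equal_get_edits : Prop := ∀ (operations : List String), Dom_get_edits operations → Spec_get_edits operations (get_edits operations)

-- ===== LEMMAS AND PROOFS =====

def pvLabel (op : String) : List String := (pvLabelOpt op).toList

-- A's loop body emission, as a list
def pvEmitA (prev op : String) : List String :=
  if op = "i" ∧ prev ≠ "i" then ["insertion"]
  else if op = "d" ∧ prev ≠ "d" then ["deletion"]
  else if op = "s" ∧ prev ≠ "s" then ["substitution"]
  else []

-- recursion view of A's loop
def pvGoA (prev : String) : List String → List String
  | [] => []
  | op :: rest => pvEmitA prev op ++ pvGoA op rest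

-- reference function: emission with an optional previous element
def pvGo (p : Option String) : List String → List String
  | [] => []
  | op :: rest => (if p ≠ some op then pvLabel op else []) ++ pvGo (some op) rest

theorem pvFoldA_eq (ops : List String) : ∀ (acc : List String) (prev : String),
    (ops.foldl
      (fun (st : List String × String) op =>
        if op = "i" ∧ st.2 ≠ "i" then (st.1 ++ ["insertion"], op)
        else if op = "d" ∧ st.2 ≠ "d" then (st.1 ++ ["deletion"], op)
        else if op = "s" ∧ st.2 ≠ "s" then (st.1 ++ ["substitution"], op)
        else (st.1, op)) (acc, prev)).1 = acc ++ pvGoA prev ops := by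
  induction ops with
  | nil => intro acc prev; simp [pvGoA]
  | cons op rest ih =>
    intro acc prev
    simp only [List.foldl_cons, pvGoA, pvEmitA]
    split_ifs <;> simp [ih, List.append_assoc]

theorem pvEmitA_eq_label (prev op : String) :
    pvEmitA prev op = if prev ≠ op then pvLabel op else [] := by
  by_cases h1 : op = "i"
  · subst h1
    by_cases hpo : prev = "i" <;> simp [pvEmitA, pvLabel, pvLabelOpt, pvLabels, hpo]
  · by_cases h2 : op = "d"
    · subst h2
      by_cases hpo : prev = "d" <;> simp [pvEmitA, pvLabel, pvLabelOpt, pvLabels, hpo]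
    · by_cases h3 : op = "s"
      · subst h3
        by_cases hpo : prev = "s" <;> simp [pvEmitA, pvLabel, pvLabelOpt, pvLabels, hpo]
      · have hl : pvLabel op = [] := by
          have e1 : ("i" == op) = false := beq_eq_false_iff_ne.mpr (fun h => h1 h.symm)
          have e2 : ("d" == op) = false := beq_eq_false_iff_ne.mpr (fun h => h2 h.symm)
          have e3 : ("s" == op) = false := beq_eq_false_iff_ne.mpr (fun h => h3 h.symm)
          simp [pvLabel, pvLabelOpt, pvLabels, List.find?, e1, e2, e3]
        simp [pvEmitA, h1, h2, h3, hl]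

theorem pvGoA_eq_go (ops : List String) : ∀ (prev : String),
    pvGoA prev ops = pvGo (some prev) ops := by
  induction ops with
  | nil => intro prev; rfl
  | cons op rest ih =>
    intro prev
    simp only [pvGoA, pvGo, ih, pvEmitA_eq_label]
    congr 1
    by_cases h : prev = op <;> simp [h]

theorem pvGo_none (ops : List String) : pvGo none ops = pvGo (some "") ops := by
  cases ops with
  | nil => rfl
  | cons op rest =>
    simp only [pvGo]
    congr 1
    by_cases h : op = "" <;>
      simp [h, pvLabel, pvLabelOpt, pvLabels, List.find?]

theorem pvGo_cons (p : Option String) (op : String) (rest : List String) :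
    pvGo p (op :: rest) = (if p ≠ some op then pvLabel op else []) ++ pvGo (some op) rest := rfl

-- splitting pvGo at a nonempty left part
theorem pvGo_append (l : List String) : ∀ (r : List String) (p : Option String), l ≠ [] →
    pvGo p (l ++ r) = pvGo p l ++ pvGo (some (l.getLast?.getD "")) r := by
  induction l with
  | nil => intro r p h; exact absurd rfl h
  | cons op rest ih =>
    intro r p _
    cases rest with
    | nil => simp [pvGo]
    | cons b t =>
      have hne : (b :: t) ≠ ([] : List String) := by simp
      rw [List.cons_append, pvGo_cons, pvGo_cons, ih r (some op) hne, List.append_assoc]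
      simp [List.getLast?_cons_cons]

-- relating pvGo with some-prev to pvGo with fresh start on a nonempty list
theorem pvGo_some_head (op : String) (rest : List String) (p : String) :
    pvGo (some p) (op :: rest) =
      if p = op ∧ (pvLabelOpt op).isSome then (pvGo none (op :: rest)).drop 1
      else pvGo none (op :: rest) := by
  by_cases hp : p = op
  · by_cases hs : (pvLabelOpt op).isSome
    · cases hv : pvLabelOpt op with
      | none => simp [hv] at hs
      | some v => simp [pvGo, hp, pvLabel, hv]
    · have hv : pvLabelOpt op = none := by
        cases hv : pvLabelOpt op with
        | none => rfl
        | some v => simp [hv] at hs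
      simp [pvGo, hp, pvLabel, hv]
  · simp [pvGo, hp]

theorem pvSolve_eq_go (ops : List String) : pvSolve ops = pvGo none ops := by
  induction hn : ops.length using Nat.strong_induction_on generalizing ops with
  | _ n ih =>
    subst hn
    by_cases h : ops.length ≤ 1
    · rw [pvSolve, dif_pos h]
      match ops, h with
      | [], _ => rfl
      | [op], _ =>
        simp only [List.filterMap, pvGo, pvLabel]
        cases pvLabelOpt op <;> rfl
    · rw [pvSolve, dif_neg h]
      have hlen : 2 ≤ ops.length := by omega
      have hmid1 : 1 ≤ ops.length / 2 := by omega
      have hmidlt : ops.length / 2 < ops.length := by omega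
      have htl : (ops.take (ops.length / 2)).length = ops.length / 2 := by
        simp [List.length_take]; omega
      have hdl : (ops.drop (ops.length / 2)).length = ops.length - ops.length / 2 := by
        simp [List.length_drop]
      have hl_ne : ops.take (ops.length / 2) ≠ [] := by
        intro hc; rw [hc] at htl; simp at htl; omega
      have hr_ne : ops.drop (ops.length / 2) ≠ [] := by
        intro hc; rw [hc] at hdl; simp at hdl; omega
      obtain ⟨rh, rt, hr⟩ := List.exists_cons_of_ne_nil hr_ne
      have ihl : pvSolve (ops.take (ops.length / 2)) = pvGo none (ops.take (ops.length / 2)) :=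
        ih _ (by omega) _ htl
      have ihr : pvSolve (ops.drop (ops.length / 2)) = pvGo none (ops.drop (ops.length / 2)) :=
        ih _ (by rw [hdl]; omega) _ rfl
      conv_rhs => rw [(List.take_append_drop (ops.length / 2) ops).symm]
      rw [pvGo_append _ _ none hl_ne, ihl, ihr]
      congr 1
      have hhead : (ops.drop (ops.length / 2)).head?.getD "" = rh := by rw [hr]; rfl
      rw [hr, pvGo_some_head, ← hr, hhead]

-- ===== VERDICT (by name: the statement is the Claim_ definition above) =====
theorem get_edits_spec : Claim_equal_get_edits := by
  intro operations _
  show get_edits operations = get_edits_alt operations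
  rw [get_edits, get_edits_alt, pvFoldA_eq, pvSolve_eq_go, pvGo_none, List.nil_append,
    pvGoA_eq_go]
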